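-- pv_equiv track=rewrite | github.com/Kiran9206/Python-Data-Structures | dsa_7.py | antidiagonals
-- ===== SOURCE A (Python) =====
-- def antidiagonals(A): #Space complexity = O(N^2),    Time Complexity = O(N^2 + N^2)>> N^2
--     arr = [[0]*len(A) for i in range(2*len(A)-1)]
--     for index in range(len(A)):
--         row = 0; column = index; i = index; j = 0
--         while(column>=0 and row < len(A)):
--             arr[i][j] = A[row][column]
--             row+=1; column-=1;j+=1
--     for index in range(1,len(A)):
--         row = index; column=len(A)-1;i=len(A)+(index-1); j = 0
--         while (row<len(A) and column>=1):
--             arr[i][j] = A[row][column]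
--             row+=1; column-=1; j+=1
--     return arr
--     '''
--     p = len(A[0])
--     res = [0]*(2*p-1)
--     for i in range((2*p)-1):
--         res[i] = []
--     for i in range(p):
--         for j in range(p):
--             res[i+j].append(A[i][j])
--     for i in range(2*p-1):
--         while len(res[i]) < p:
--             res[i].append(0)
--     return res
--     '''
-- ===== SOURCE B (Python) =====
-- def antidiagonals(A):
--     n = len(A)
--     res = [[] for _ in range(2 * n - 1)]
--     for i in range(n):
--         row = A[i]
--         for j in range(n):
--             res[i + j].append(row[j])
--     return [bucket + [0] * (n - len(bucket)) for bucket in res]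
-- ===== Notes on version B (the rewrite author's own statement) =====
-- stated objective: simpler
-- what changed: A pre-builds a zero matrix and fills it with two families of diagonal-walking while loops (one per starting column, one per starting row); B makes a single row-major pass scattering A[i][j] into bucket i+j and then pads each bucket with trailing zeros.
import Mathlib
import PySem

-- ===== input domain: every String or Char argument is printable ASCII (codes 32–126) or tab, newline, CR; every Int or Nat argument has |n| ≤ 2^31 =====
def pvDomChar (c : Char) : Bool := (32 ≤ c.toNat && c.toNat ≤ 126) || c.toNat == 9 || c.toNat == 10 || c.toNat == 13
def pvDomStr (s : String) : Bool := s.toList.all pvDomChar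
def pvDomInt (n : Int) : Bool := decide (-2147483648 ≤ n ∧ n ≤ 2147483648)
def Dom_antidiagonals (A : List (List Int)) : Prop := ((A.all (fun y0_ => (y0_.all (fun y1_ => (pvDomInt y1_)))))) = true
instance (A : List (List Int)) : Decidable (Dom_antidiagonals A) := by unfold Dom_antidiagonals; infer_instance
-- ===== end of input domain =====

-- B replaces A's two diagonal-walking while-loop passes over a pre-zeroed matrix by a single
-- row-major pass scattering A[i][j] into bucket i+j, then pads each bucket with trailing zeros
-- (objective: simpler).

-- ===== PORT A =====
-- A[r][c]; under Pre_ every index the loops touch is in range, so the 0 default is never read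
def pyCell (A : List (List Int)) (r c : Nat) : Int := (A.getD r []).getD c 0
def setMat (arr : List (List Int)) (i j : Nat) (v : Int) : List (List Int) :=
  arr.modify i (fun r => r.set j v)
def loopA1 (Amat : List (List Int)) (N : Nat) (arr : List (List Int)) (row : Nat)
    (column : Int) (i j : Nat) : List (List Int) :=
  if h : 0 ≤ column ∧ row < N then
    loopA1 Amat N (setMat arr i j (pyCell Amat row column.toNat)) (row + 1) (column - 1) i (j + 1)
  else arr
termination_by (column + 1).toNat
decreasing_by omega

def loopA2 (Amat : List (List Int)) (N : Nat) (arr : List (List Int)) (row : Nat)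
    (column : Int) (i j : Nat) : List (List Int) :=
  if h : row < N ∧ 1 ≤ column then
    loopA2 Amat N (setMat arr i j (pyCell Amat row column.toNat)) (row + 1) (column - 1) i (j + 1)
  else arr
termination_by column.toNat
decreasing_by omega

def antidiagonals (A : List (List Int)) : List (List Int) :=
  let N := A.length
  let arr0 := (List.range (2 * N - 1)).map (fun _ => List.replicate N (0 : Int))
  let arr1 := (List.range N).foldl (fun arr index => loopA1 A N arr 0 ((index : Nat) : Int) index 0) arr0
  (List.range' 1 (N - 1)).foldl
    (fun arr index => loopA2 A N arr index ((N : Int) - 1) (N + index - 1) 0) arr1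


-- ===== PORT B =====
def antidiagonals_alt (A : List (List Int)) : List (List Int) :=
  let n := A.length
  let res0 := (List.range (2 * n - 1)).map (fun _ => ([] : List Int))
  let res := (List.range n).foldl (fun res i =>
      (List.range n).foldl (fun res j => res.modify (i + j) (fun b => b ++ [pyCell A i j])) res)
    res0
  res.map (fun b => b ++ List.replicate (n - b.length) (0 : Int))

-- ===== PRECONDITION & SPEC =====
-- Pre_: every row has at least len(A) entries — exactly the inputs on which the Python A
-- returns; on a shorter row both A and B raise IndexError.
def Pre_antidiagonals (A : List (List Int)) : Prop := ∀ row ∈ A, A.length ≤ row.length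
instance (A : List (List Int)) : Decidable (Pre_antidiagonals A) := by
  unfold Pre_antidiagonals; infer_instance
def pvWitness_antidiagonals : List (List Int) := [[1, 2], [3, 4]]

def Spec_antidiagonals (A : List (List Int)) (out : List (List Int)) : Prop := out = antidiagonals_alt A
instance (A : List (List Int)) (out : List (List Int)) : Decidable (Spec_antidiagonals A out) := by
  unfold Spec_antidiagonals; infer_instance

-- ===== CLAIM (what is proved, stated in full; the proofs are below) =====
def Claim_equal_antidiagonals : Prop := ∀ (A : List (List Int)), Dom_antidiagonals A →
  Pre_antidiagonals A → Spec_antidiagonals A (antidiagonals A)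

-- ===== LEMMAS AND PROOFS =====

def fill1 (Amat : List (List Int)) (N : Nat) (r : List Int) (row : Nat) (col : Int) (j : Nat) :
    List Int :=
  if 0 ≤ col ∧ row < N then
    fill1 Amat N (r.set j (pyCell Amat row col.toNat)) (row + 1) (col - 1) (j + 1)
  else r
termination_by (col + 1).toNat
decreasing_by omega

lemma fill1_pos (A : List (List Int)) (N : Nat) (r : List Int) (row : Nat) (col : Int) (j : Nat)
    (h : 0 ≤ col ∧ row < N) :
    fill1 A N r row col j = fill1 A N (r.set j (pyCell A row col.toNat)) (row + 1) (col - 1) (j + 1) := by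
  rw [fill1, if_pos h]

lemma fill1_neg (A : List (List Int)) (N : Nat) (r : List Int) (row : Nat) (col : Int) (j : Nat)
    (h : ¬(0 ≤ col ∧ row < N)) : fill1 A N r row col j = r := by
  rw [fill1, if_neg h]

lemma loopA1_getElem (A : List (List Int)) (N : Nat) :
    ∀ (col : Int) (arr : List (List Int)) (row i j d : Nat),
      (loopA1 A N arr row col i j)[d]? =
        if i = d then arr[d]?.map (fun r => fill1 A N r row col j) else arr[d]? := by
  intro col arr row i j d
  fun_induction loopA1 A N arr row col i j with
  | case1 arr row col j h ih =>
      rw [ih]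
      simp only [setMat, List.getElem?_modify]
      by_cases hid : i = d
      · subst hid
        cases arr[i]? <;> simp [fill1_pos _ _ _ _ _ _ h]
      · simp [hid]
  | case2 arr row col j h =>
      split <;> [cases arr[d]? <;> simp [fill1_neg _ _ _ _ _ _ h]; rfl]
def seq1 (Amat : List (List Int)) (N : Nat) (row : Nat) (col : Int) : List Int :=
  if 0 ≤ col ∧ row < N then pyCell Amat row col.toNat :: seq1 Amat N (row + 1) (col - 1) else []
termination_by (col + 1).toNat
decreasing_by omega

lemma seq1_pos (A : List (List Int)) (N : Nat) (row : Nat) (col : Int) (h : 0 ≤ col ∧ row < N) :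
    seq1 A N row col = pyCell A row col.toNat :: seq1 A N (row + 1) (col - 1) := by
  rw [seq1, if_pos h]
lemma seq1_neg (A : List (List Int)) (N : Nat) (row : Nat) (col : Int) (h : ¬(0 ≤ col ∧ row < N)) :
    seq1 A N row col = [] := by
  rw [seq1, if_neg h]

lemma seq1_length (A : List (List Int)) (N : Nat) :
    ∀ (col : Int) (row : Nat), (seq1 A N row col).length = min (col + 1).toNat (N - row) := by
  intro col row
  fun_induction seq1 A N row col with
  | case1 row col h ih => simp only [List.length_cons, ih]; omega
  | case2 row col h => simp only [List.length_nil]; omega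

lemma fill1_eq (A : List (List Int)) (N : Nat) :
    ∀ (col : Int) (r : List Int) (row j : Nat),
      j + (seq1 A N row col).length ≤ r.length →
      fill1 A N r row col j =
        r.take j ++ seq1 A N row col ++ r.drop (j + (seq1 A N row col).length) := by
  intro col r row j
  fun_induction fill1 A N r row col j with
  | case1 r row col j h ih =>
      intro hlen
      rw [seq1_pos _ _ _ _ h] at hlen ⊢
      simp only [List.length_cons] at hlen
      have hj : j < r.length := by omega
      rw [ih (by simpa using by omega : j + 1 + (seq1 A N (row+1) (col-1)).length ≤ (r.set j (pyCell A row col.toNat)).length)]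
      rw [List.take_set, List.drop_set]
      have h1 : (r.take (j + 1)).set j (pyCell A row col.toNat)
          = r.take j ++ [pyCell A row col.toNat] := by
        rw [List.take_add_one]
        have : r[j]? = some r[j] := List.getElem?_eq_getElem hj
        rw [this]
        simp only [Option.toList_some]
        rw [show (r.take j ++ [r[j]]).set j (pyCell A row col.toNat)
            = r.take j ++ ([r[j]].set 0 (pyCell A row col.toNat)) from ?_]
        · simp
        · rw [List.set_append]
          simp [List.length_take, Nat.min_eq_left (le_of_lt hj)]
      rw [if_pos (by omega)]
      simp only [h1, List.length_cons]
      have : j + 1 + (seq1 A N (row + 1) (col - 1)).length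
           = j + ((seq1 A N (row + 1) (col - 1)).length + 1) := by omega
      simp [this]
  | case2 r row col j h =>
      intro hlen
      rw [seq1_neg _ _ _ _ h]
      simp
lemma seq1_eq (A : List (List Int)) (N : Nat) :
    ∀ (c : Nat) (row : Nat), row + c < N →
      seq1 A N row (c : Int) = (List.range (c + 1)).map (fun k => pyCell A (row + k) (c - k)) := by
  intro c
  induction c with
  | zero =>
      intro row h
      rw [seq1_pos _ _ _ _ ⟨by omega, by omega⟩, seq1_neg _ _ _ _ (by omega)]
      simp
  | succ c ih =>
      intro row h
      rw [seq1_pos _ _ _ _ ⟨by omega, by omega⟩]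
      have h1 : ((c : Int) + 1).toNat = c + 1 := by omega
      have h2 : ((c : Int) + 1) - 1 = (c : Int) := by omega
      rw [show ((c + 1 : Nat) : Int) = (c : Int) + 1 by push_cast; ring] at *
      rw [h1, h2, ih (row + 1) (by omega)]
      rw [List.range_succ_eq_map (n := c + 1)]
      simp only [List.map_cons, List.map_map]
      congr 1
      apply List.map_congr_left
      intro k hk
      simp only [Function.comp]
      congr 1 <;> omega

def fill2 (Amat : List (List Int)) (N : Nat) (r : List Int) (row : Nat) (col : Int) (j : Nat) :
    List Int :=
  if row < N ∧ 1 ≤ col then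
    fill2 Amat N (r.set j (pyCell Amat row col.toNat)) (row + 1) (col - 1) (j + 1)
  else r
termination_by col.toNat
decreasing_by omega
def seq2 (Amat : List (List Int)) (N : Nat) (row : Nat) (col : Int) : List Int :=
  if row < N ∧ 1 ≤ col then pyCell Amat row col.toNat :: seq2 Amat N (row + 1) (col - 1) else []
termination_by col.toNat
decreasing_by omega

lemma fill2_pos (A : List (List Int)) (N : Nat) (r : List Int) (row : Nat) (col : Int) (j : Nat)
    (h : row < N ∧ 1 ≤ col) :
    fill2 A N r row col j = fill2 A N (r.set j (pyCell A row col.toNat)) (row + 1) (col - 1) (j + 1) := by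
  rw [fill2, if_pos h]
lemma fill2_neg (A : List (List Int)) (N : Nat) (r : List Int) (row : Nat) (col : Int) (j : Nat)
    (h : ¬(row < N ∧ 1 ≤ col)) : fill2 A N r row col j = r := by
  rw [fill2, if_neg h]
lemma seq2_pos (A : List (List Int)) (N : Nat) (row : Nat) (col : Int) (h : row < N ∧ 1 ≤ col) :
    seq2 A N row col = pyCell A row col.toNat :: seq2 A N (row + 1) (col - 1) := by
  rw [seq2, if_pos h]
lemma seq2_neg (A : List (List Int)) (N : Nat) (row : Nat) (col : Int) (h : ¬(row < N ∧ 1 ≤ col)) :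
    seq2 A N row col = [] := by
  rw [seq2, if_neg h]

lemma loopA2_getElem (A : List (List Int)) (N : Nat) :
    ∀ (col : Int) (arr : List (List Int)) (row i j d : Nat),
      (loopA2 A N arr row col i j)[d]? =
        if i = d then arr[d]?.map (fun r => fill2 A N r row col j) else arr[d]? := by
  intro col arr row i j d
  fun_induction loopA2 A N arr row col i j with
  | case1 arr row col j h ih =>
      rw [ih]
      simp only [setMat, List.getElem?_modify]
      by_cases hid : i = d
      · subst hid
        cases arr[i]? <;> simp [fill2_pos _ _ _ _ _ _ h]
      · simp [hid]
  | case2 arr row col j h =>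
      split <;> [cases arr[d]? <;> simp [fill2_neg _ _ _ _ _ _ h]; rfl]

lemma seq2_length (A : List (List Int)) (N : Nat) :
    ∀ (col : Int) (row : Nat), (seq2 A N row col).length = min col.toNat (N - row) := by
  intro col row
  fun_induction seq2 A N row col with
  | case1 row col h ih => simp only [List.length_cons, ih]; omega
  | case2 row col h => simp only [List.length_nil]; omega

lemma fill2_eq (A : List (List Int)) (N : Nat) :
    ∀ (col : Int) (r : List Int) (row j : Nat),
      j + (seq2 A N row col).length ≤ r.length →
      fill2 A N r row col j =
        r.take j ++ seq2 A N row col ++ r.drop (j + (seq2 A N row col).length) := by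
  intro col r row j
  fun_induction fill2 A N r row col j with
  | case1 r row col j h ih =>
      intro hlen
      rw [seq2_pos _ _ _ _ h] at hlen ⊢
      simp only [List.length_cons] at hlen
      have hj : j < r.length := by omega
      rw [ih (by simpa using by omega : j + 1 + (seq2 A N (row+1) (col-1)).length ≤ (r.set j (pyCell A row col.toNat)).length)]
      rw [List.take_set, List.drop_set]
      have h1 : (r.take (j + 1)).set j (pyCell A row col.toNat)
          = r.take j ++ [pyCell A row col.toNat] := by
        rw [List.take_add_one]
        have : r[j]? = some r[j] := List.getElem?_eq_getElem hj
        rw [this]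
        simp only [Option.toList_some]
        rw [show (r.take j ++ [r[j]]).set j (pyCell A row col.toNat)
            = r.take j ++ ([r[j]].set 0 (pyCell A row col.toNat)) from ?_]
        · simp
        · rw [List.set_append]
          simp [List.length_take, Nat.min_eq_left (le_of_lt hj)]
      rw [if_pos (by omega)]
      simp only [h1, List.length_cons]
      have : j + 1 + (seq2 A N (row + 1) (col - 1)).length
           = j + ((seq2 A N (row + 1) (col - 1)).length + 1) := by omega
      simp [this]
  | case2 r row col j h =>
      intro hlen
      rw [seq2_neg _ _ _ _ h]
      simp

lemma seq2_eq (A : List (List Int)) (N : Nat) :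
    ∀ (c : Nat) (row : Nat),
      seq2 A N row (c : Int) =
        (List.range (min c (N - row))).map (fun k => pyCell A (row + k) (c - k)) := by
  intro c
  induction c with
  | zero =>
      intro row
      rw [seq2_neg _ _ _ _ (by omega)]
      simp
  | succ c ih =>
      intro row
      by_cases hrow : row < N
      · rw [seq2_pos _ _ _ _ ⟨hrow, by push_cast; omega⟩]
        have h1 : (((c + 1 : Nat) : Int)).toNat = c + 1 := by omega
        have h2 : ((c + 1 : Nat) : Int) - 1 = (c : Int) := by push_cast; ring
        rw [h1, h2, ih (row + 1)]
        have hm : min (c + 1) (N - row) = min c (N - (row + 1)) + 1 := by omega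
        rw [hm, List.range_succ_eq_map]
        simp only [List.map_cons, List.map_map]
        congr 1
        apply List.map_congr_left
        intro k hk
        simp only [Function.comp]
        congr 1 <;> omega
      · rw [seq2_neg _ _ _ _ (by omega)]
        have : min (c + 1) (N - row) = 0 := by omega
        rw [this]
        simp
lemma foldl_rows {F : List (List Int) → Nat → List (List Int)} {g : Nat → List Int → List Int}
    (hF : ∀ arr idx d, (F arr idx)[d]? = if idx = d then arr[d]?.map (g idx) else arr[d]?) :
    ∀ (l : List Nat), l.Nodup → ∀ (arr : List (List Int)) (d : Nat),
      (l.foldl F arr)[d]? = if d ∈ l then arr[d]?.map (g d) else arr[d]? := by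
  intro l
  induction l with
  | nil => simp
  | cons x l ih =>
      intro hnd arr d
      rw [List.foldl_cons, ih hnd.of_cons]
      by_cases hdl : d ∈ l
      · have hdx : x ≠ d := fun he => ((List.nodup_cons.mp hnd).1 (he ▸ hdl)).elim
        rw [if_pos hdl, hF, if_neg hdx, if_pos (List.mem_cons_of_mem _ hdl)]
      · rw [if_neg hdl, hF]
        by_cases hdx : x = d
        · subst hdx
          simp
        · rw [if_neg hdx, if_neg (by simp [hdl, Ne.symm hdx])]

lemma inner_getElem (A : List (List Int)) :
    ∀ (n i d : Nat) (res : List (List Int)),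
      ((List.range n).foldl (fun res j => res.modify (i + j) (fun b => b ++ [pyCell A i j])) res)[d]? =
        if i ≤ d ∧ d < i + n then res[d]?.map (fun b => b ++ [pyCell A i (d - i)]) else res[d]? := by
  intro n
  induction n with
  | zero => intro i d res; simp
  | succ n ih =>
      intro i d res
      rw [List.range_succ, List.foldl_append, List.foldl_cons, List.foldl_nil,
        List.getElem?_modify, ih]
      by_cases hd : i + n = d
      · rw [if_neg (by omega)]
        subst hd
        rw [if_pos ⟨by omega, by omega⟩]
        cases res[i + n]? <;> simp [(show i + n - i = n by omega)]
      · by_cases hc : i ≤ d ∧ d < i + n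
        · rw [if_pos hc, if_pos ⟨hc.1, by omega⟩]
          cases res[d]? <;> simp [hd]
        · rw [if_neg hc, if_neg (by omega)]
          cases res[d]? <;> simp [hd]

lemma outer_getElem (A : List (List Int)) (n : Nat) :
    ∀ (m : Nat) (res : List (List Int)) (d : Nat),
      ((List.range m).foldl (fun res i =>
          (List.range n).foldl (fun res j => res.modify (i + j) (fun b => b ++ [pyCell A i j])) res)
        res)[d]? =
      res[d]?.map (fun b => b ++ (List.range m).filterMap
        (fun i => if i ≤ d ∧ d < i + n then some (pyCell A i (d - i)) else none)) := by
  intro m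
  induction m with
  | zero => intro res d; cases h : res[d]? <;> simp [h]
  | succ m ih =>
      intro res d
      rw [List.range_succ, List.foldl_append, List.foldl_cons, List.foldl_nil,
        inner_getElem, List.filterMap_append]
      by_cases hc : m ≤ d ∧ d < m + n
      · rw [if_pos hc, ih]
        cases res[d]? <;> simp [hc]
      · rw [if_neg hc, ih]
        cases res[d]? <;> simp [hc]
def bucket (A : List (List Int)) (n d : Nat) : List Int :=
  (List.range n).filterMap
    (fun i => if i ≤ d ∧ d < i + n then some (pyCell A i (d - i)) else none)

lemma filterMap_le {g : Nat → Int} :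
    ∀ (n d : Nat), d < n →
      (List.range n).filterMap (fun i => if i ≤ d then some (g i) else none)
        = (List.range (d + 1)).map g := by
  intro n
  induction n with
  | zero => intro d h; omega
  | succ n ih =>
      intro d h
      by_cases hdn : d < n
      · rw [List.range_succ, List.filterMap_append, ih d hdn]
        simp [(show ¬ n ≤ d by omega)]
      · have hd' : d = n := by omega
        subst hd'
        rw [List.filterMap_congr (g := some ∘ g)
          (fun x hx => by simp [Nat.le_of_lt_succ (List.mem_range.mp hx)])]
        rw [List.filterMap_eq_map]

lemma filterMap_ge {g : Nat → Int} :
    ∀ (n a : Nat),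
      (List.range n).filterMap (fun i => if a ≤ i then some (g i) else none)
        = (List.range' a (n - a)).map g := by
  intro n
  induction n with
  | zero => intro a; simp
  | succ n ih =>
      intro a
      rw [List.range_succ, List.filterMap_append, ih a]
      by_cases ha : a ≤ n
      · rw [show n + 1 - a = (n - a) + 1 by omega, List.range'_1_concat]
        simp [ha, show a + (n - a) = n by omega]
      · rw [show n + 1 - a = 0 by omega, show n - a = 0 by omega]
        simp [ha]

lemma bucket_lt (A : List (List Int)) (n d : Nat) (hd : d < n) :
    bucket A n d = (List.range (d + 1)).map (fun k => pyCell A k (d - k)) := by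
  unfold bucket
  rw [List.filterMap_congr (g := fun i => if i ≤ d then some (pyCell A i (d - i)) else none)
    (fun x hx => by
      have := List.mem_range.mp hx
      by_cases h : x ≤ d <;> simp [h, show d < x + n by omega])]
  exact filterMap_le n d hd

lemma bucket_ge (A : List (List Int)) (n d : Nat) (hn : n ≤ d) :
    bucket A n d =
      (List.range (2 * n - 1 - d)).map (fun k => pyCell A (d - n + 1 + k) (n - 1 - k)) := by
  unfold bucket
  rw [List.filterMap_congr (g := fun i => if d - n + 1 ≤ i then some (pyCell A i (d - i)) else none)
    (fun x hx => by
      have := List.mem_range.mp hx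
      by_cases h : d - n + 1 ≤ x
      · simp [h, show x ≤ d by omega, show d < x + n by omega]
      · simp [h, show ¬ (x ≤ d ∧ d < x + n) by omega])]
  rw [filterMap_ge n (d - n + 1), List.range'_eq_map_range, List.map_map]
  rw [show n - (d - n + 1) = 2 * n - 1 - d by omega]
  apply List.map_congr_left
  intro k hk
  have := List.mem_range.mp hk
  simp only [Function.comp]
  congr 1 <;> omega

theorem ports_agree (A : List (List Int)) :
    antidiagonals A = antidiagonals_alt A := by
  set N := A.length with hN
  by_cases hN0 : N = 0
  · have : A = [] := List.length_eq_zero_iff.mp hN0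
    subst this
    rfl
  have hN1 : 1 ≤ N := by omega
  apply List.ext_getElem?
  intro d
  -- right-hand side
  have hres0 : ∀ d : Nat, ((List.range (2 * N - 1)).map (fun _ => ([] : List Int)))[d]?
      = if d < 2 * N - 1 then some [] else none := by
    intro d
    by_cases h : d < 2 * N - 1
    · rw [List.getElem?_map, List.getElem?_range h]; simp [h]
    · rw [List.getElem?_eq_none (by simp; omega)]
      simp [h]
  have hrhs : (antidiagonals_alt A)[d]? =
      if d < 2 * N - 1 then
        some (bucket A N d ++ List.replicate (N - (bucket A N d).length) 0) else none := by
    unfold antidiagonals_alt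
    simp only [← hN]
    rw [List.getElem?_map, outer_getElem, hres0]
    by_cases h : d < 2 * N - 1 <;> simp [h, bucket]
  -- left-hand side
  have harr0 : ∀ d : Nat, ((List.range (2 * N - 1)).map (fun _ => List.replicate N (0 : Int)))[d]?
      = if d < 2 * N - 1 then some (List.replicate N (0 : Int)) else none := by
    intro d
    by_cases h : d < 2 * N - 1
    · rw [List.getElem?_map, List.getElem?_range h]; simp [h]
    · rw [List.getElem?_eq_none (by simp; omega)]
      simp [h]
  have harr1 : ∀ d : Nat,
      ((List.range N).foldl (fun arr index => loopA1 A N arr 0 ((index : Nat) : Int) index 0)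
        ((List.range (2 * N - 1)).map (fun _ => List.replicate N (0 : Int))))[d]?
      = if d ∈ List.range N then
          (if d < 2 * N - 1 then some (List.replicate N (0 : Int)) else none).map
            (fun r => fill1 A N r 0 ((d : Nat) : Int) 0)
        else (if d < 2 * N - 1 then some (List.replicate N (0 : Int)) else none) := by
    intro d
    rw [foldl_rows (g := fun idx r => fill1 A N r 0 ((idx : Nat) : Int) 0)
      (fun arr idx d => loopA1_getElem A N _ arr 0 idx 0 d) (List.range N) List.nodup_range _ d,
      harr0]
  have hconv : (List.range' 1 (N - 1)).foldl
      (fun arr index => loopA2 A N arr index ((N : Int) - 1) (N + index - 1) 0)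
      ((List.range N).foldl (fun arr index => loopA1 A N arr 0 ((index : Nat) : Int) index 0)
        ((List.range (2 * N - 1)).map (fun _ => List.replicate N (0 : Int))))
      = (List.range' N (N - 1)).foldl
      (fun arr r => loopA2 A N arr (r - N + 1) ((N : Int) - 1) r 0)
      ((List.range N).foldl (fun arr index => loopA1 A N arr 0 ((index : Nat) : Int) index 0)
        ((List.range (2 * N - 1)).map (fun _ => List.replicate N (0 : Int)))) := by
    rw [show List.range' N (N - 1) = (List.range' 1 (N - 1)).map (fun i => N + i - 1) from ?_]
    · rw [List.foldl_map]
      apply List.foldl_ext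
      intro arr i hi
      have hi1 : 1 ≤ i := (List.mem_range'_1.mp hi).1
      rw [show N + i - 1 - N + 1 = i by omega]
    · rw [List.range'_eq_map_range, List.range'_eq_map_range, List.map_map]
      apply List.map_congr_left
      intro k _
      simp only [Function.comp]
      omega
  have hlhs : (antidiagonals A)[d]? =
      if d ∈ List.range' N (N - 1) then
        (if d ∈ List.range N then
          (if d < 2 * N - 1 then some (List.replicate N (0 : Int)) else none).map
            (fun r => fill1 A N r 0 ((d : Nat) : Int) 0)
        else (if d < 2 * N - 1 then some (List.replicate N (0 : Int)) else none)).map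
          (fun r => fill2 A N r (d - N + 1) ((N : Int) - 1) 0)
      else (if d ∈ List.range N then
          (if d < 2 * N - 1 then some (List.replicate N (0 : Int)) else none).map
            (fun r => fill1 A N r 0 ((d : Nat) : Int) 0)
        else (if d < 2 * N - 1 then some (List.replicate N (0 : Int)) else none)) := by
    show ((List.range' 1 (N - 1)).foldl _ _)[d]? = _
    rw [hconv,
      foldl_rows (g := fun idx r => fill2 A N r (idx - N + 1) ((N : Int) - 1) 0)
        (fun arr idx d => loopA2_getElem A N _ arr (idx - N + 1) idx 0 d)
        (List.range' N (N - 1)) (List.nodup_range' 1) _ d,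
      harr1]
  rw [hlhs, hrhs]
  by_cases hd2 : d < 2 * N - 1
  · simp only [List.mem_range, List.mem_range'_1, if_pos hd2]
    by_cases hdN : d < N
    · rw [if_neg (by omega), if_pos hdN]
      simp only [Option.map_some]
      congr 1
      rw [fill1_eq A N _ _ _ _ (by
          rw [seq1_length, List.length_replicate]
          omega)]
      rw [List.take_zero, List.nil_append, List.drop_replicate, seq1_length]
      rw [seq1_eq A N d 0 (by omega)]
      rw [bucket_lt A N d hdN]
      simp
      omega
    · rw [if_pos (by omega), if_neg hdN]
      simp only [Option.map_some]
      congr 1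
      rw [fill2_eq A N _ _ _ _ (by
          rw [seq2_length, List.length_replicate]
          omega)]
      rw [List.take_zero, List.nil_append, List.drop_replicate, seq2_length]
      rw [show ((N : Int) - 1) = ((N - 1 : Nat) : Int) by omega]
      rw [seq2_eq A N (N - 1) (d - N + 1)]
      rw [bucket_ge A N d (by omega)]
      simp
      rw [show min (N - 1) (N - (d - N + 1)) = 2 * N - 1 - d by omega]
  · simp [hd2, List.mem_range, List.mem_range'_1]

-- ===== VERDICT (by name: the statement is the Claim_ definition above) =====
theorem antidiagonals_spec : Claim_equal_antidiagonals :=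
  fun A _ _ => ports_agree A
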